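-- pv_equiv track=rewrite | github.com/jobomat/capito | capito/haleres/job_utils.py | get_job_limit_map
-- ===== SOURCE A (Python) =====
-- from typing import List, Tuple, Dict
--
-- def get_job_limit_map(free_nodes: int, pending_job_map: Dict[str, int]) -> Dict[str, int]:
--     """
--     pending_job_map is a map of jobnames and pending jobfiles for this jobname.
--     A jobname is put together py the share (cg1, 2, 3) plus the actual jobname.
--     e.g. {"cg1/shot01": 25, "cg1/shot3": 5, "cg3/shot12": 10, ...}
--
--     returns a dict with the suggested limits for each jobname.
--     e.g. {"cg1/shot01": 10, "cg1/shot3": 5, "cg3/shot12": 10, ...}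
--
--     these limits can be used as first parameter of the submit.sh script.
--     """
--     pending_jobs = sum(pending_job_map.values())
--     limit_map = {jobname: 0 for jobname in pending_job_map}
--
--     while free_nodes > 0 and pending_jobs > 0:
--         num_jobs = sum(n != 0 for n in pending_job_map.values())
--         even_share = int(free_nodes / num_jobs) or 1
--         # even_share = even_share or 1
--
--         for job, num in pending_job_map.items():
--             chunk = min(num, even_share, free_nodes)
--             limit_map[job] += chunk
--             pending_job_map[job] -= chunk
--             free_nodes -= chunk
--             pending_jobs -= chunk
--
--     return limit_map
-- ===== SOURCE B (Python) =====
-- from typing import Dict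
--
-- def get_job_limit_map(free_nodes: int, pending_job_map: Dict[str, int]) -> Dict[str, int]:
--     """Water-filling in closed form: sort the demands once, find the common
--     level L analytically, then hand the remainder out as +1s in dict order
--     (exactly where A's final share-of-1 pass puts them).
--     Unlike A, this function does not mutate pending_job_map."""
--     demands = list(pending_job_map.values())
--     total = sum(demands)
--     if free_nodes <= 0 or total <= 0:
--         return {job: 0 for job in pending_job_map}
--     if free_nodes >= total:
--         return dict(pending_job_map)
--     # find level L and remainder r: sum(min(d, L)) + r == free_nodes,
--     # r < number of demands still above L
--     ds = sorted(demands)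
--     n = len(ds)
--     rem = free_nodes
--     L = 0
--     for i, d in enumerate(ds):
--         cnt = n - i              # demands ds[i:] are all >= d
--         if rem >= (d - L) * cnt:
--             rem -= (d - L) * cnt
--             L = d
--         else:
--             L += rem // cnt
--             rem = rem % cnt
--             break
--     out = {}
--     r = rem
--     for job, d in pending_job_map.items():
--         if d > L and r > 0:
--             out[job] = min(d, L) + 1
--             r -= 1
--         else:
--             out[job] = min(d, L)
--     return out
-- ===== Notes on version B (the rewrite author's own statement) =====
-- stated objective: alternative
-- what changed: A hands out nodes in repeated round-robin passes over the dict until the budget is gone; B sorts the demands once, computes the final water-filling level and remainder analytically, and emits the allocation in a single pass, distributing the remainder as +1s in dict order.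
import Mathlib
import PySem

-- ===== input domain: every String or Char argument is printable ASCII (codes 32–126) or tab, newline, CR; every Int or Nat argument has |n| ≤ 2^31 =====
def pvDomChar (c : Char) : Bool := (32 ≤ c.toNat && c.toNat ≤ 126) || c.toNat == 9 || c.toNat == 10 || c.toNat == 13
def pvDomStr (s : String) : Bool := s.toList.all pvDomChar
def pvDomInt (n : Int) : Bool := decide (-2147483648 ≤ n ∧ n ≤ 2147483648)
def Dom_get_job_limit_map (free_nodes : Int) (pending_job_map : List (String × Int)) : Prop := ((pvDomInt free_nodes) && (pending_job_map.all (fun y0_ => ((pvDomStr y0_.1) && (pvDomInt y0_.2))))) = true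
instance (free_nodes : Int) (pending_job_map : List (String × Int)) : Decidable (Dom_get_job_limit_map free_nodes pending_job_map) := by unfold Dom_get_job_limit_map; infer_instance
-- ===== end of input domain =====

-- B replaces A's repeated round-robin passes over the dict by one analytic water-filling
-- computation (sort the demands, find the level and remainder, emit in one pass); equivalence
-- is about the RETURN value only — the Python A also mutates pending_job_map in place, B does not.

-- ===== PORT A =====
-- `m[k] += c` on a Python dict modeled as an association list: update the first entry with key k
-- (exact: a Python dict has pairwise-distinct keys, and k is always present where A uses this).
def pvDictAdd (m : List (String × Int)) (k : String) (c : Int) : List (String × Int) :=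
  match m with
  | [] => []
  | p :: tl => if p.1 = k then (p.1, p.2 + c) :: tl else p :: pvDictAdd tl k c

-- the body of A's `for job, num in pending_job_map.items():` loop; iterating the snapshot of
-- items is exact because A only ever assigns to the key currently being yielded.  State:
-- (free_nodes, pending_jobs, pending_job_map, limit_map).
def pvPassA (even_share : Int) (items : List (String × Int))
    (st : Int × Int × List (String × Int) × List (String × Int)) :
    Int × Int × List (String × Int) × List (String × Int) :=
  items.foldl (fun st p =>
    let chunk := min (min p.2 even_share) st.1
    (st.1 - chunk, st.2.1 - chunk, pvDictAdd st.2.2.1 p.1 (-chunk), pvDictAdd st.2.2.2 p.1 chunk)) st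

-- A's while-loop, ported with fuel.  Under Pre_ every iteration consumes at least one free node,
-- so `free_nodes.toNat + 1` iterations suffice; the extra summands are only slack outside Pre_.
-- `int(free_nodes / num_jobs)` is float division truncated: PySem.Int.truncdiv, exact here
-- since |free_nodes| ≤ 2^31 < 2^53 on Dom.
def pvLoopA : Nat → Int → Int → List (String × Int) → List (String × Int) → List (String × Int)
  | 0, _, _, _, limit_map => limit_map
  | fuel + 1, free_nodes, pending_jobs, pending_job_map, limit_map =>
    if free_nodes > 0 ∧ pending_jobs > 0 then
      -- num_jobs = sum(n != 0 for n in pending_job_map.values())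
      let num_jobs : Int := (pending_job_map.map (fun p => if p.2 ≠ 0 then (1 : Int) else 0)).sum
      let es := PySem.Int.truncdiv free_nodes num_jobs
      let even_share := if es = 0 then 1 else es          -- `or 1`
      let st := pvPassA even_share pending_job_map (free_nodes, pending_jobs, pending_job_map, limit_map)
      pvLoopA fuel st.1 st.2.1 st.2.2.1 st.2.2.2
    else limit_map

def get_job_limit_map (free_nodes : Int) (pending_job_map : List (String × Int)) : List (String × Int) :=
  let pending_jobs := (pending_job_map.map (·.2)).sum
  let limit_map := pending_job_map.map (fun p => (p.1, (0 : Int)))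
  pvLoopA (free_nodes.toNat + ((pending_job_map.map (fun p => p.2.natAbs)).sum) + pending_job_map.length + 2)
    free_nodes pending_jobs pending_job_map limit_map

-- ===== PORT B =====
-- the `for i, d in enumerate(ds): ... / break` scan of Source B: walk the sorted demands raising
-- the level; cnt = n - i is the length of the remaining suffix.  Returns (L, rem).
def pvScanB : List Int → Int → Int → Int × Int
  | [], L, rem => (L, rem)
  | d :: tl, L, rem =>
    let cnt : Int := (d :: tl).length
    if rem ≥ (d - L) * cnt then pvScanB tl d (rem - (d - L) * cnt)
    else (L + PySem.Int.floordiv rem cnt, PySem.Int.mod rem cnt)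

-- Source B's output loop: min(d, L), plus one for the first r jobs in dict order with d > L.
def pvAssignB : List (String × Int) → Int → Int → List (String × Int)
  | [], _, _ => []
  | p :: tl, L, r =>
    if p.2 > L ∧ r > 0 then (p.1, min p.2 L + 1) :: pvAssignB tl L (r - 1)
    else (p.1, min p.2 L) :: pvAssignB tl L r

def get_job_limit_map_alt (free_nodes : Int) (pending_job_map : List (String × Int)) : List (String × Int) :=
  let demands := pending_job_map.map (·.2)
  let total := demands.sum
  if free_nodes ≤ 0 ∨ total ≤ 0 then pending_job_map.map (fun p => (p.1, (0 : Int)))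
  else if free_nodes ≥ total then pending_job_map
  else
    let ds := PySem.List.sorted demands (fun x => x) false
    let lr := pvScanB ds 0 free_nodes
    pvAssignB pending_job_map lr.1 lr.2

-- ===== PRECONDITION & SPEC =====
-- Pre_ excludes (a) duplicate keys — a Python dict cannot hold them, the association list stands
-- for a dict — and (b) negative pending counts combined with a positive node budget: negative
-- counts are outside the natural domain of job-file counts, and there A's round-robin leftovers
-- produce accidental allocations B does not reproduce (with free_nodes ≤ 0 both return all
-- zeros, so those inputs stay admitted).
def Pre_get_job_limit_map (free_nodes : Int) (pending_job_map : List (String × Int)) : Prop :=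
  (pending_job_map.map Prod.fst).Nodup ∧ (free_nodes ≤ 0 ∨ ∀ p ∈ pending_job_map, 0 ≤ p.2)
instance (free_nodes : Int) (pending_job_map : List (String × Int)) : Decidable (Pre_get_job_limit_map free_nodes pending_job_map) := by unfold Pre_get_job_limit_map; infer_instance

def pvWitness_get_job_limit_map : Int × (List (String × Int)) :=
  (5, [("cg1/shot01", 3), ("cg1/shot3", 1), ("cg3/shot12", 7)])

def Spec_get_job_limit_map (free_nodes : Int) (pending_job_map : List (String × Int)) (out : List (String × Int)) : Prop := out = get_job_limit_map_alt free_nodes pending_job_map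
instance (free_nodes : Int) (pending_job_map : List (String × Int)) (out : List (String × Int)) : Decidable (Spec_get_job_limit_map free_nodes pending_job_map out) := by unfold Spec_get_job_limit_map; infer_instance

-- ===== CLAIM (what is proved, stated in full; the proofs are below) =====
def Claim_equal_get_job_limit_map : Prop := ∀ (free_nodes : Int) (pending_job_map : List (String × Int)), Dom_get_job_limit_map free_nodes pending_job_map → Pre_get_job_limit_map free_nodes pending_job_map → Spec_get_job_limit_map free_nodes pending_job_map (get_job_limit_map free_nodes pending_job_map)

-- ===== LEMMAS AND PROOFS =====

-- ---- value-level vocabulary ----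

/-- Σ min(d, l) over the demand list. -/
def pvClamp (v : List Int) (l : Int) : Int := (v.map (fun d => min d l)).sum

/-- number of demands strictly above l, as an Int. -/
def pvGT (v : List Int) (l : Int) : Int := (v.countP (fun d => decide (l < d)) : Int)

/-- one round-robin pass at share s with free budget: each entry takes min(d, s, free-left). -/
def pvChunks (s : Int) : Int → List Int → List Int
  | _, [] => []
  | free, d :: tl => let c := min (min d s) free; c :: pvChunks s (free - c) tl

/-- value-level image of A's while loop. -/
def pvLoopV : Nat → Int → Int → List Int → List Int → List Int
  | 0, _, _, _, lim => lim
  | fuel + 1, free, pend, v, lim =>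
    if free > 0 ∧ pend > 0 then
      let num : Int := (v.map (fun d => if d ≠ 0 then (1 : Int) else 0)).sum
      let es := PySem.Int.truncdiv free num
      let s := if es = 0 then 1 else es
      let c := pvChunks s free v
      pvLoopV fuel (free - c.sum) (pend - c.sum) (v.zipWith (· - ·) c) (lim.zipWith (· + ·) c)
    else lim

/-- value-level image of B's output pass. -/
def pvAssignV : List Int → Int → Int → List Int
  | [], _, _ => []
  | d :: tl, L, r =>
    if d > L ∧ r > 0 then (min d L + 1) :: pvAssignV tl L (r - 1)
    else (min d L) :: pvAssignV tl L r

/-- the (level, remainder) specification of the water-filling split of F over v. -/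
def pvLR (F : Int) (v : List Int) (L r : Int) : Prop :=
  0 ≤ L ∧ 0 ≤ r ∧ pvClamp v L + r = F ∧ r < pvGT v L

/-- what both programs compute on the values, stated declaratively. -/
def pvAlloc (F : Int) (v : List Int) (a : List Int) : Prop :=
  (F ≤ 0 ∧ a = v.map (fun _ => 0))
  ∨ (0 < F ∧ v.sum ≤ F ∧ a = v)
  ∨ (0 < F ∧ F < v.sum ∧ ∃ L r, pvLR F v L r ∧ a = pvAssignV v L r)

-- ---- basic clamp/count lemmas ----

theorem pvClamp_cons (d : Int) (tl : List Int) (l : Int) :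
    pvClamp (d :: tl) l = min d l + pvClamp tl l := by simp [pvClamp]

theorem pvGT_cons (d : Int) (tl : List Int) (l : Int) :
    pvGT (d :: tl) l = (if l < d then 1 else 0) + pvGT tl l := by
  simp only [pvGT, List.countP_cons]
  by_cases h : l < d
  · simp [h]; push_cast; ring
  · simp [h]

theorem pvGT_nonneg (v : List Int) (l : Int) : 0 ≤ pvGT v l := Int.natCast_nonneg _

theorem pvClamp_succ (v : List Int) (l : Int) :
    pvClamp v (l + 1) = pvClamp v l + pvGT v l := by
  induction v with
  | nil => simp [pvClamp, pvGT]
  | cons d tl ih =>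
    rw [pvClamp_cons, pvClamp_cons, pvGT_cons, ih]
    split_ifs with h <;> omega

theorem pvClamp_mono (v : List Int) {l l' : Int} (h : l ≤ l') : pvClamp v l ≤ pvClamp v l' := by
  induction v with
  | nil => simp [pvClamp]
  | cons d tl ih => rw [pvClamp_cons, pvClamp_cons]; omega

theorem pvClamp_nonneg (v : List Int) {l : Int} (hv : ∀ d ∈ v, 0 ≤ d) (hl : 0 ≤ l) :
    0 ≤ pvClamp v l := by
  induction v with
  | nil => simp [pvClamp]
  | cons d tl ih =>
    rw [pvClamp_cons]
    have hd := hv d (by simp)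
    have := ih (fun x hx => hv x (by simp [hx]))
    omega

theorem pvClamp_le_sum (v : List Int) (l : Int) (hv : ∀ d ∈ v, 0 ≤ d) :
    pvClamp v l ≤ v.sum := by
  induction v with
  | nil => simp [pvClamp]
  | cons d tl ih =>
    rw [pvClamp_cons, List.sum_cons]
    have := ih (fun x hx => hv x (by simp [hx]))
    have hd := hv d (by simp)
    omega

theorem pvClamp_zero (v : List Int) (hv : ∀ d ∈ v, 0 ≤ d) : pvClamp v 0 = 0 := by
  induction v with
  | nil => rfl
  | cons d tl ih =>
    rw [pvClamp_cons, ih (fun x hx => hv x (by simp [hx]))]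
    have := hv d (by simp)
    omega

theorem pvClamp_const (v : List Int) {l : Int} (hv : ∀ x ∈ v, l ≤ x) :
    pvClamp v l = l * v.length := by
  induction v with
  | nil => simp [pvClamp]
  | cons d tl ih =>
    rw [pvClamp_cons, ih (fun x hx => hv x (by simp [hx]))]
    have := hv d (by simp)
    have hm : min d l = l := by omega
    rw [hm]
    simp only [List.length_cons]
    push_cast
    ring

theorem pvGT_const (v : List Int) {l : Int} (hv : ∀ x ∈ v, l < x) :
    pvGT v l = v.length := by
  induction v with
  | nil => simp [pvGT]
  | cons d tl ih =>
    rw [pvGT_cons, ih (fun x hx => hv x (by simp [hx]))]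
    have := hv d (by simp)
    rw [if_pos this]
    simp only [List.length_cons]
    push_cast
    ring

theorem pvGT_le_sum (v : List Int) (hv : ∀ d ∈ v, 0 ≤ d) : pvGT v 0 ≤ v.sum := by
  induction v with
  | nil => simp [pvGT]
  | cons d tl ih =>
    rw [pvGT_cons, List.sum_cons]
    have := ih (fun x hx => hv x (by simp [hx]))
    have hd := hv d (by simp)
    split_ifs with h <;> omega

theorem pvGT_pos (v : List Int) (hv : ∀ d ∈ v, 0 ≤ d) (hs : 0 < v.sum) : 0 < pvGT v 0 := by
  induction v with
  | nil => simp at hs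
  | cons d tl ih =>
    rw [pvGT_cons]
    rw [List.sum_cons] at hs
    have hd := hv d (by simp)
    by_cases h : 0 < d
    · rw [if_pos h]; have := pvGT_nonneg tl 0; omega
    · rw [if_neg h]
      have hd0 : d = 0 := by omega
      have : 0 < tl.sum := by omega
      have := ih (fun x hx => hv x (by simp [hx])) this
      omega

theorem pvClamp_le_gt_mul (v : List Int) {s : Int} (hv : ∀ d ∈ v, 0 ≤ d) (hs : 0 ≤ s) :
    pvClamp v s ≤ pvGT v 0 * s := by
  induction v with
  | nil => simp [pvClamp, pvGT]
  | cons d tl ih =>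
    rw [pvClamp_cons, pvGT_cons, add_mul]
    have := ih (fun x hx => hv x (by simp [hx]))
    have hd := hv d (by simp)
    split_ifs with h
    · have : min d s ≤ 1 * s := by omega
      omega
    · have hd0 : d = 0 := by omega
      have : min d s = 0 := by omega
      omega

theorem pvClamp_pos (v : List Int) {s : Int} (hv : ∀ d ∈ v, 0 ≤ d) (hs : 0 < s)
    (hsum : 0 < v.sum) : 0 < pvClamp v s := by
  induction v with
  | nil => simp at hsum
  | cons d tl ih =>
    rw [pvClamp_cons]
    rw [List.sum_cons] at hsum
    have hd := hv d (by simp)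
    have htl : ∀ x ∈ tl, 0 ≤ x := fun x hx => hv x (by simp [hx])
    by_cases h : 0 < d
    · have : 0 < min d s := by omega
      have := pvClamp_nonneg tl htl (le_of_lt hs)
      omega
    · have hd0 : d = 0 := by omega
      have : 0 < tl.sum := by omega
      have := ih htl this
      omega

theorem pvClamp_lt_sum_gt_pos (v : List Int) {s : Int} (hv : ∀ d ∈ v, 0 ≤ d)
    (h : pvClamp v s < v.sum) : 0 < pvGT v s := by
  induction v with
  | nil => simp [pvClamp] at h
  | cons d tl ih =>
    rw [pvClamp_cons] at h
    rw [List.sum_cons] at h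
    rw [pvGT_cons]
    have htl : ∀ x ∈ tl, 0 ≤ x := fun x hx => hv x (by simp [hx])
    have hgtn := pvGT_nonneg tl s
    by_cases hc : s < d
    · rw [if_pos hc]; omega
    · rw [if_neg hc]
      have : min d s = d := by omega
      have : pvClamp tl s < tl.sum := by omega
      have := ih htl this
      omega

theorem pvClamp_eq_sum_imp (v : List Int) {s : Int} (hv : ∀ d ∈ v, 0 ≤ d)
    (h : pvClamp v s = v.sum) : v.map (fun d => min d s) = v := by
  induction v with
  | nil => rfl
  | cons d tl ih =>
    rw [pvClamp_cons] at h
    rw [List.sum_cons] at h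
    have htl : ∀ x ∈ tl, 0 ≤ x := fun x hx => hv x (by simp [hx])
    have h1 : min d s ≤ d := min_le_left _ _
    have h2 : pvClamp tl s ≤ tl.sum := pvClamp_le_sum tl s htl
    have hmd : min d s = d := by omega
    have hts : pvClamp tl s = tl.sum := by omega
    simp only [List.map_cons, hmd, ih htl hts]

/-- uniqueness of the water-filling split. -/
theorem pvLR_unique {F : Int} {v : List Int} {L r L' r' : Int}
    (h : pvLR F v L r) (h' : pvLR F v L' r') : L = L' ∧ r = r' := by
  have key : ∀ (a b c d : Int), pvLR F v a b → pvLR F v c d → a < c → False := by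
    intro a b c d ⟨ha, hb, hec, hltc⟩ ⟨hc, hd, hed, hltd⟩ hac
    have h1 : pvClamp v (a + 1) ≤ pvClamp v c := pvClamp_mono v (by omega)
    have h2 := pvClamp_succ v a
    omega
  have hLL : L = L' := by
    by_contra hne
    rcases lt_or_gt_of_ne hne with h1 | h1
    · exact key L r L' r' h h' h1
    · exact key L' r' L r h' h h1
  subst hLL
  obtain ⟨_, _, he, _⟩ := h
  obtain ⟨_, _, he', _⟩ := h'
  exact ⟨rfl, by omega⟩

-- ---- the scan computes the split ----

theorem pvScanB_cons (d : Int) (tl : List Int) (L rem : Int) :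
    pvScanB (d :: tl) L rem =
      if rem ≥ (d - L) * ((d :: tl).length : Int) then
        pvScanB tl d (rem - (d - L) * ((d :: tl).length : Int))
      else (L + PySem.Int.floordiv rem ((d :: tl).length : Int),
            PySem.Int.mod rem ((d :: tl).length : Int)) := rfl

theorem pvScanB_go : ∀ (v : List Int) (L0 rem : Int),
    v.Pairwise (· ≤ ·) → (∀ x ∈ v, L0 ≤ x) → 0 ≤ rem →
    rem < v.sum - L0 * v.length →
    L0 ≤ (pvScanB v L0 rem).1 ∧ 0 ≤ (pvScanB v L0 rem).2 ∧
      pvClamp v (pvScanB v L0 rem).1 - L0 * v.length + (pvScanB v L0 rem).2 = rem ∧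
      (pvScanB v L0 rem).2 < pvGT v (pvScanB v L0 rem).1 := by
  intro v
  induction v with
  | nil => intro L0 rem _ _ hr hlt; simp at hlt; omega
  | cons d tl ih =>
    intro L0 rem hpw hge hr hlt
    have hcnt : (0:Int) < ((d :: tl).length : Int) := by
      have : 0 < (d :: tl).length := Nat.succ_pos _
      exact_mod_cast this
    have hd0 : L0 ≤ d := hge d (by simp)
    have htlge : ∀ x ∈ tl, d ≤ x := fun x hx => (List.pairwise_cons.mp hpw).1 x hx
    have htlpw : tl.Pairwise (· ≤ ·) := (List.pairwise_cons.mp hpw).2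
    rw [pvScanB_cons]
    set cnt : Int := ((d :: tl).length : Int) with hcntdef
    have hcnt1 : cnt = (tl.length : Int) + 1 := by
      rw [hcntdef]; simp only [List.length_cons]; push_cast; ring
    by_cases hc : rem ≥ (d - L0) * cnt
    · rw [if_pos hc]
      have hsum : (d :: tl).sum = d + tl.sum := by simp
      have hexp : (d - L0) * cnt = d * (tl.length : Int) + d - L0 * (tl.length : Int) - L0 := by
        rw [hcnt1]; ring
      have hlt' : rem - (d - L0) * cnt < tl.sum - d * tl.length := by
        have h0 : rem < (d :: tl).sum - L0 * ((d :: tl).length : Int) := by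
          simpa [hcntdef] using hlt
        rw [hsum, ← hcntdef, hcnt1] at h0
        have : L0 * ((tl.length : Int) + 1) = L0 * (tl.length : Int) + L0 := by ring
        linarith [hexp]
      obtain ⟨g1, g2, g3, g4⟩ := ih d (rem - (d - L0) * cnt) htlpw htlge (by linarith) hlt'
      refine ⟨by omega, g2, ?_, ?_⟩
      · rw [pvClamp_cons]
        have hmin : min d (pvScanB tl d (rem - (d - L0) * cnt)).1 = d := by omega
        rw [hmin]
        have hL0c : L0 * cnt = L0 * (tl.length : Int) + L0 := by rw [hcnt1]; ring
        linarith [hexp, g3, hL0c]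
      · rw [pvGT_cons]
        have : ¬ ((pvScanB tl d (rem - (d - L0) * cnt)).1 < d) := by omega
        rw [if_neg this]
        omega
    · rw [if_neg hc]
      push_neg at hc
      have hdL0 : L0 < d := by nlinarith
      have hq0 : 0 ≤ PySem.Int.floordiv rem cnt :=
        (PySem.Int.le_floordiv_iff_mul_le hcnt).mpr (by linarith)
      have hqlt : PySem.Int.floordiv rem cnt < d - L0 :=
        (PySem.Int.floordiv_lt_iff_lt_mul hcnt).mpr hc
      have hLd : L0 + PySem.Int.floordiv rem cnt < d := by omega
      have hall : ∀ x ∈ d :: tl, L0 + PySem.Int.floordiv rem cnt < x := by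
        intro x hx
        rcases List.mem_cons.mp hx with h | h
        · omega
        · have := htlge x h; omega
      have hmodn := PySem.Int.mod_nonneg rem hcnt
      have hmodl := PySem.Int.mod_lt rem hcnt
      have hfm := PySem.Int.floordiv_mul_add_mod rem cnt
      refine ⟨by omega, hmodn, ?_, ?_⟩
      · rw [pvClamp_const (d :: tl) (fun x hx => le_of_lt (hall x hx))]
        rw [← hcntdef]
        nlinarith [hfm]
      · rw [pvGT_const (d :: tl) hall, ← hcntdef]
        exact hmodl

theorem pvScanB_spec (ds : List Int) (F : Int)
    (hs : ds.Pairwise (· ≤ ·)) (hv : ∀ x ∈ ds, 0 ≤ x) (hF0 : 0 < F) (hFs : F < ds.sum) :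
    pvLR F ds (pvScanB ds 0 F).1 (pvScanB ds 0 F).2 := by
  obtain ⟨g1, g2, g3, g4⟩ := pvScanB_go ds 0 F hs hv (le_of_lt hF0) (by simpa using hFs)
  exact ⟨g1, g2, by omega, g4⟩

/-- pvLR transports along permutations (clamp and count are multiset functions). -/
theorem pvLR_perm {v w : List Int} (hp : v.Perm w) {F L r : Int}
    (h : pvLR F v L r) : pvLR F w L r := by
  obtain ⟨h1, h2, h3, h4⟩ := h
  refine ⟨h1, h2, ?_, ?_⟩
  · have he : (v.map (fun d => min d L)).sum = (w.map (fun d => min d L)).sum :=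
      (hp.map _).sum_eq
    simpa [pvClamp, he] using h3
  · have he : v.countP (fun d => decide (L < d)) = w.countP (fun d => decide (L < d)) :=
      hp.countP_eq _
    simpa [pvGT, he] using h4

-- ---- pass lemmas ----

theorem pvChunks_length (s : Int) : ∀ (free : Int) (v : List Int),
    (pvChunks s free v).length = v.length := by
  intro free v
  induction v generalizing free with
  | nil => rfl
  | cons d tl ih => simp [pvChunks, ih]

/-- a full pass: when the budget covers Σ min(d,s), every entry takes exactly min(d,s). -/
theorem pvChunks_full (s : Int) : ∀ (free : Int) (v : List Int),
    (∀ d ∈ v, 0 ≤ d) → 0 ≤ s → pvClamp v s ≤ free →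
    pvChunks s free v = v.map (fun d => min d s) := by
  intro free v
  induction v generalizing free with
  | nil => intro _ _ _; rfl
  | cons d tl ih =>
    intro hv hs hcl
    rw [pvClamp_cons] at hcl
    have htl : ∀ x ∈ tl, 0 ≤ x := fun x hx => hv x (by simp [hx])
    have hcn := pvClamp_nonneg tl htl hs
    have hc : min (min d s) free = min d s := by omega
    rw [pvChunks]
    simp only [hc]
    rw [ih (free - min d s) htl hs (by omega)]
    rfl

/-- the cut-off pass: share 1 with a short budget gives 1 to the first `free` positive entries. -/
theorem pvChunks_cons (s free d : Int) (tl : List Int) :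
    pvChunks s free (d :: tl) =
      min (min d s) free :: pvChunks s (free - min (min d s) free) tl := rfl

/-- the cut-off pass: share 1 with a short budget gives 1 to the first `free` positive entries. -/
theorem pvChunks_cutoff : ∀ (free : Int) (v : List Int), (∀ d ∈ v, 0 ≤ d) → 0 ≤ free →
    pvChunks 1 free v = pvAssignV v 0 free ∧
      (pvChunks 1 free v).sum = min free (pvGT v 0) := by
  intro free v
  induction v generalizing free with
  | nil => intro _ hf; refine ⟨rfl, ?_⟩; simp [pvChunks, pvGT]; omega
  | cons d tl ih =>
    intro hv hf
    have hd := hv d (by simp)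
    have htl : ∀ x ∈ tl, 0 ≤ x := fun x hx => hv x (by simp [hx])
    have hgtn := pvGT_nonneg tl 0
    by_cases h0 : d = 0
    · have hc : min (min d 1) free = 0 := by omega
      obtain ⟨e1, e2⟩ := ih free htl hf
      have hng : ¬ (d > 0 ∧ free > 0) := by omega
      have hchunks : pvChunks 1 free (d :: tl) = 0 :: pvChunks 1 free tl := by
        rw [pvChunks_cons, hc, sub_zero]
      have hassign : pvAssignV (d :: tl) 0 free = 0 :: pvAssignV tl 0 free := by
        rw [pvAssignV, if_neg hng]
        have hm0 : min d 0 = 0 := by omega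
        rw [hm0]
      refine ⟨?_, ?_⟩
      · rw [hchunks, hassign, e1]
      · rw [hchunks, List.sum_cons, e2, pvGT_cons, if_neg (by omega : ¬ (0:Int) < d)]
        omega
    · have hd1 : 1 ≤ d := by omega
      by_cases hfp : 0 < free
      · have hc : min (min d 1) free = 1 := by omega
        obtain ⟨e1, e2⟩ := ih (free - 1) htl (by omega)
        have hchunks : pvChunks 1 free (d :: tl) = 1 :: pvChunks 1 (free - 1) tl := by
          rw [pvChunks_cons, hc]
        have hassign : pvAssignV (d :: tl) 0 free = 1 :: pvAssignV tl 0 (free - 1) := by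
          rw [pvAssignV, if_pos (by omega : d > 0 ∧ free > 0)]
          have hm1 : min d 0 + 1 = 1 := by omega
          rw [hm1]
        refine ⟨?_, ?_⟩
        · rw [hchunks, hassign, e1]
        · rw [hchunks, List.sum_cons, e2, pvGT_cons, if_pos (by omega : (0:Int) < d)]
          omega
      · have hf0 : free = 0 := by omega
        have hc : min (min d 1) free = 0 := by omega
        obtain ⟨e1, e2⟩ := ih free htl hf
        have hng : ¬ (d > 0 ∧ free > 0) := by omega
        have hchunks : pvChunks 1 free (d :: tl) = 0 :: pvChunks 1 free tl := by
          rw [pvChunks_cons, hc, sub_zero]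
        have hassign : pvAssignV (d :: tl) 0 free = 0 :: pvAssignV tl 0 free := by
          rw [pvAssignV, if_neg hng]
          have hm0 : min d 0 = 0 := by omega
          rw [hm0]
        refine ⟨?_, ?_⟩
        · rw [hchunks, hassign, e1]
        · rw [hchunks, List.sum_cons, e2, pvGT_cons, if_pos (by omega : (0:Int) < d)]
          omega

theorem pvAssignV_of_nonpos : ∀ (v : List Int) (L : Int) {r : Int}, r ≤ 0 →
    pvAssignV v L r = v.map (fun d => min d L) := by
  intro v L r hr
  induction v generalizing r with
  | nil => rfl
  | cons d tl ih =>
    rw [pvAssignV]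
    rw [if_neg (by omega)]
    rw [ih hr]
    rfl

theorem pvAssignV_length : ∀ (v : List Int) (L r : Int), (pvAssignV v L r).length = v.length := by
  intro v
  induction v with
  | nil => intro _ _; rfl
  | cons d tl ih =>
    intro L r
    rw [pvAssignV]
    split_ifs <;> simp [ih]

/-- shifting a pass out of the assignment: min(d,s) + assign of residuals at L = assign at L+s. -/
theorem pvAssignV_shift (s L : Int) (hs : 0 ≤ s) (hL : 0 ≤ L) :
    ∀ (v : List Int) (r : Int), (∀ d ∈ v, 0 ≤ d) →
    (v.map (fun d => min d s)).zipWith (· + ·) (pvAssignV (v.map (fun d => d - min d s)) L r) =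
      pvAssignV v (L + s) r := by
  intro v
  induction v with
  | nil => intro _ _; rfl
  | cons d tl ih =>
    intro r hv
    have hd := hv d (by simp)
    have htl : ∀ x ∈ tl, 0 ≤ x := fun x hx => hv x (by simp [hx])
    simp only [List.map_cons]
    rw [pvAssignV, pvAssignV]
    have hiff : (d - min d s > L ∧ r > 0) ↔ (d > L + s ∧ r > 0) := by omega
    by_cases hc : d > L + s ∧ r > 0
    · rw [if_pos (hiff.mpr hc), if_pos hc]
      rw [List.zipWith_cons_cons]
      rw [ih (r - 1) htl]
      have : min d s + (min (d - min d s) L + 1) = min d (L + s) + 1 := by omega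
      rw [this]
    · rw [if_neg (fun h => hc (hiff.mp h)), if_neg hc]
      rw [List.zipWith_cons_cons]
      rw [ih r htl]
      have : min d s + min (d - min d s) L = min d (L + s) := by omega
      rw [this]

-- ---- small list helpers ----

theorem pvZip_add_zeros {α : Type} : ∀ (x : List Int) (y : List α), x.length = y.length →
    x.zipWith (· + ·) (y.map (fun _ => (0:Int))) = x := by
  intro x
  induction x with
  | nil => intro y _; rfl
  | cons a tl ih =>
    intro y hy
    cases y with
    | nil => simp at hy
    | cons b ytl =>
      simp only [List.map_cons, List.zipWith_cons_cons, add_zero]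
      rw [ih ytl (by simpa using hy)]

theorem pvZeros_zip_add {α : Type} : ∀ (y : List α) (a : List Int), y.length = a.length →
    (y.map (fun _ => (0:Int))).zipWith (· + ·) a = a := by
  intro y
  induction y with
  | nil => intro a ha; cases a with | nil => rfl | cons _ _ => simp at ha
  | cons b ytl ih =>
    intro a ha
    cases a with
    | nil => simp at ha
    | cons x atl =>
      simp only [List.map_cons, List.zipWith_cons_cons, zero_add]
      rw [ih atl (by simpa using ha)]

theorem pvZipAdd_assoc : ∀ (x y z : List Int),
    (x.zipWith (· + ·) y).zipWith (· + ·) z = x.zipWith (· + ·) (y.zipWith (· + ·) z) := by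
  intro x
  induction x with
  | nil => intro y z; rfl
  | cons a xtl ih =>
    intro y z
    cases y with
    | nil => rfl
    | cons b ytl =>
      cases z with
      | nil => rfl
      | cons c ztl =>
        simp only [List.zipWith_cons_cons]
        rw [ih ytl ztl, add_assoc]

theorem pvZipSub_map (f : Int → Int) : ∀ (v : List Int),
    v.zipWith (· - ·) (v.map f) = v.map (fun d => d - f d) := by
  intro v
  induction v with
  | nil => rfl
  | cons d tl ih => simp only [List.map_cons, List.zipWith_cons_cons, ih]

theorem pvMin_add_resid (s : Int) : ∀ (v : List Int),
    (v.map (fun d => min d s)).zipWith (· + ·) (v.map (fun d => d - min d s)) = v := by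
  intro v
  induction v with
  | nil => rfl
  | cons d tl ih =>
    simp only [List.map_cons, List.zipWith_cons_cons, ih]
    congr 1
    omega

theorem pvResid_sum (s : Int) : ∀ (v : List Int),
    (v.map (fun d => d - min d s)).sum = v.sum - pvClamp v s := by
  intro v
  induction v with
  | nil => simp [pvClamp]
  | cons d tl ih =>
    rw [pvClamp_cons]
    simp only [List.map_cons, List.sum_cons, ih]
    ring

theorem pvResid_nonneg (s : Int) (v : List Int) (hv : ∀ d ∈ v, 0 ≤ d) :
    ∀ x ∈ v.map (fun d => d - min d s), 0 ≤ x := by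
  intro x hx
  rcases List.mem_map.mp hx with ⟨d, hd, rfl⟩
  have := hv d hd
  omega

theorem pvClamp_shift (s L : Int) (hs : 0 ≤ s) (hL : 0 ≤ L) (v : List Int)
    (hv : ∀ d ∈ v, 0 ≤ d) :
    pvClamp v (L + s) = pvClamp v s + pvClamp (v.map (fun d => d - min d s)) L := by
  induction v with
  | nil => simp [pvClamp]
  | cons d tl ih =>
    have hd := hv d (by simp)
    have htl : ∀ x ∈ tl, 0 ≤ x := fun x hx => hv x (by simp [hx])
    simp only [List.map_cons]
    rw [pvClamp_cons, pvClamp_cons, pvClamp_cons, ih htl]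
    have : min d (L + s) = min d s + min (d - min d s) L := by omega
    omega

theorem pvGT_shift (s L : Int) (hs : 0 ≤ s) (hL : 0 ≤ L) (v : List Int)
    (hv : ∀ d ∈ v, 0 ≤ d) :
    pvGT (v.map (fun d => d - min d s)) L = pvGT v (L + s) := by
  induction v with
  | nil => rfl
  | cons d tl ih =>
    have hd := hv d (by simp)
    have htl : ∀ x ∈ tl, 0 ≤ x := fun x hx => hv x (by simp [hx])
    simp only [List.map_cons]
    rw [pvGT_cons, pvGT_cons, ih htl]
    have : (L < d - min d s) ↔ (L + s < d) := by omega
    by_cases hc : L + s < d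
    · rw [if_pos hc, if_pos (this.mpr hc)]
    · rw [if_neg hc, if_neg (fun h => hc (this.mp h))]

theorem pvSum_nonpos_eq_zeros (v : List Int) (hv : ∀ d ∈ v, 0 ≤ d) (hs : v.sum ≤ 0) :
    v.map (fun _ => (0:Int)) = v := by
  induction v with
  | nil => rfl
  | cons d tl ih =>
    rw [List.sum_cons] at hs
    have hd := hv d (by simp)
    have htl : ∀ x ∈ tl, 0 ≤ x := fun x hx => hv x (by simp [hx])
    have htls : tl.sum ≤ 0 := by
      have : 0 ≤ tl.sum := List.sum_nonneg htl
      omega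
    have hd0 : d = 0 := by
      have : 0 ≤ tl.sum := List.sum_nonneg htl
      omega
    simp only [List.map_cons, ih htl htls, hd0]

theorem pvNum_eq (v : List Int) (hv : ∀ d ∈ v, 0 ≤ d) :
    (v.map (fun d => if d ≠ 0 then (1 : Int) else 0)).sum = pvGT v 0 := by
  induction v with
  | nil => simp [pvGT]
  | cons d tl ih =>
    have hd := hv d (by simp)
    have htl : ∀ x ∈ tl, 0 ≤ x := fun x hx => hv x (by simp [hx])
    simp only [List.map_cons, List.sum_cons, ih htl]
    rw [pvGT_cons]
    by_cases h : d = 0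
    · rw [if_neg (by simpa using h), if_neg (by omega)]
    · rw [if_pos (by simpa using h), if_pos (by omega)]

-- ---- the value-level loop meets the spec ----

theorem pvLoopV_free_nonpos (fuel : Nat) (free pend : Int) (v lim : List Int)
    (h : ¬ (free > 0 ∧ pend > 0)) : pvLoopV fuel free pend v lim = lim := by
  cases fuel with
  | zero => rfl
  | succ n => rw [pvLoopV, if_neg h]

theorem pvLoopV_spec : ∀ (fuel : Nat) (free : Int) (v lim : List Int),
    (∀ d ∈ v, 0 ≤ d) → free.toNat < fuel → lim.length = v.length →
    ∃ a, pvAlloc free v a ∧ pvLoopV fuel free v.sum v lim = lim.zipWith (· + ·) a := by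
  intro fuel
  induction fuel with
  | zero => intro free v lim _ h _; omega
  | succ fuel ih =>
    intro free v lim hv hfuel hlen
    by_cases hg : free > 0 ∧ v.sum > 0
    case neg =>
      rw [pvLoopV, if_neg hg]
      by_cases hf : free ≤ 0
      · refine ⟨v.map (fun _ => 0), Or.inl ⟨hf, rfl⟩, ?_⟩
        rw [pvZip_add_zeros lim v hlen]
      · push_neg at hf
        have hsum : v.sum ≤ 0 := by
          by_contra hc
          exact hg ⟨hf, by omega⟩
        refine ⟨v, Or.inr (Or.inl ⟨hf, by omega, rfl⟩), ?_⟩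
        conv_lhs => rw [← pvZip_add_zeros lim v hlen]
        congr 1
        exact pvSum_nonpos_eq_zeros v hv hsum
    case pos =>
      obtain ⟨hfree, hsum⟩ := hg
      rw [pvLoopV, if_pos ⟨hfree, hsum⟩]
      simp only []
      rw [pvNum_eq v hv]
      have hnum : 0 < pvGT v 0 := pvGT_pos v hv hsum
      have htd : PySem.Int.truncdiv free (pvGT v 0) = free / pvGT v 0 := by
        unfold PySem.Int.truncdiv
        exact Int.tdiv_eq_ediv_of_nonneg (le_of_lt hfree)
      rw [htd]
      by_cases hcut : free < pvGT v 0
      case pos =>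
        -- cut-off pass: even_share = 1, the budget runs out mid-pass
        have hdiv0 : free / pvGT v 0 = 0 := Int.ediv_eq_zero_of_lt (le_of_lt hfree) hcut
        rw [hdiv0, if_pos rfl]
        obtain ⟨hch, hchs⟩ := pvChunks_cutoff free v hv (le_of_lt hfree)
        have hcs : (pvChunks 1 free v).sum = free := by
          rw [hchs]; omega
        rw [hcs, sub_self]
        rw [pvLoopV_free_nonpos fuel 0 _ _ _ (by omega)]
        refine ⟨pvChunks 1 free v, ?_, rfl⟩
        right; right
        have hgs := pvGT_le_sum v hv
        refine ⟨hfree, by omega, 0, free, ⟨le_refl 0, le_of_lt hfree, ?_, ?_⟩, hch⟩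
        · rw [pvClamp_zero v hv]; omega
        · exact hcut
      case neg =>
        -- full pass at share s = free / num ≥ 1
        push_neg at hcut
        have hs1 : 1 ≤ free / pvGT v 0 := by
          rw [Int.le_ediv_iff_mul_le hnum]; omega
        set s := free / pvGT v 0 with hsdef
        rw [if_neg (by omega)]
        have hns : pvGT v 0 * s ≤ free := by
          have : s ≤ free / pvGT v 0 := le_refl _
          have := (Int.le_ediv_iff_mul_le hnum).mp this
          linarith [this]
        have hclam : pvClamp v s ≤ free := by
          have := pvClamp_le_gt_mul v hv (by omega : (0:Int) ≤ s)
          linarith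
        have hch := pvChunks_full s free v hv (by omega) hclam
        have hcsum : (pvChunks s free v).sum = pvClamp v s := by
          rw [hch]; rfl
        rw [hcsum, hch, pvZipSub_map (fun d => min d s) v]
        have hrs := pvResid_sum s v
        have hfree' : 0 ≤ free - pvClamp v s := by omega
        have hcpos : 0 < pvClamp v s := pvClamp_pos v hv (by omega) hsum
        have hfuel' : (free - pvClamp v s).toNat < fuel := by omega
        have hlen' : (lim.zipWith (· + ·) (v.map (fun d => min d s))).length =
            (v.map (fun d => d - min d s)).length := by
          simp [hlen]
        have hresn := pvResid_nonneg s v hv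
        have hstep : v.sum - pvClamp v s = (v.map (fun d => d - min d s)).sum := by omega
        rw [hstep]
        obtain ⟨a', ha', heq⟩ := ih (free - pvClamp v s) (v.map (fun d => d - min d s))
          (lim.zipWith (· + ·) (v.map (fun d => min d s))) hresn hfuel' hlen'
        rw [heq, pvZipAdd_assoc]
        refine ⟨(v.map (fun d => min d s)).zipWith (· + ·) a', ?_, rfl⟩
        -- now show the combined allocation meets pvAlloc free v
        rcases ha' with ⟨hf0, ha0⟩ | ⟨hf1, hs1', ha1⟩ | ⟨hf2, hs2, L', r', hlr, ha2⟩
        · -- free was exactly consumed: allocation is min(d, s) with no remainder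
          have hfe : free = pvClamp v s := by omega
          have haz : (v.map (fun d => min d s)).zipWith (· + ·) a' = v.map (fun d => min d s) := by
            rw [ha0, pvZip_add_zeros]
            simp
          rw [haz]
          by_cases hvs : v.sum ≤ free
          · right; left
            refine ⟨hfree, hvs, ?_⟩
            have : pvClamp v s = v.sum := by
              have := pvClamp_le_sum v s hv
              omega
            exact pvClamp_eq_sum_imp v hv this
          · right; right
            push_neg at hvs
            refine ⟨hfree, hvs, s, 0, ⟨by omega, le_refl 0, by omega, ?_⟩, ?_⟩
            · have : pvClamp v s < v.sum := by omega
              exact pvClamp_lt_sum_gt_pos v hv this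
            · rw [pvAssignV_of_nonpos v s (le_refl 0)]
        · -- residual demand fits in the rest of the budget: everything is granted
          have : (v.map (fun d => min d s)).zipWith (· + ·) a' = v := by
            rw [ha1]; exact pvMin_add_resid s v
          rw [this]
          right; left
          refine ⟨hfree, ?_, rfl⟩
          omega
        · -- proper water-filling level L' + s with remainder r'
          right; right
          refine ⟨hfree, by omega, L' + s, r', ?_, ?_⟩
          · obtain ⟨hL', hr', he', hlt'⟩ := hlr
            refine ⟨by omega, hr', ?_, ?_⟩
            · rw [pvClamp_shift s L' (by omega) hL' v hv]; omega
            · rw [← pvGT_shift s L' (by omega) hL' v hv]; exact hlt'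
          · obtain ⟨hL', _, _, _⟩ := hlr
            rw [ha2, pvAssignV_shift s L' (by omega) hL' v r' hv]

-- ---- dict level reduces to value level ----

theorem pvDictAdd_notmem : ∀ (d1 : List (String × Int)) (k : String) (c : Int),
    k ∉ d1.map Prod.fst → ∀ (rest : List (String × Int)),
    pvDictAdd (d1 ++ rest) k c = d1 ++ pvDictAdd rest k c := by
  intro d1 k c h rest
  induction d1 with
  | nil => rfl
  | cons p tl ih =>
    simp only [List.map_cons, List.mem_cons] at h
    push_neg at h
    have hne : ¬ (p.1 = k) := fun he => h.1 he.symm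
    simp only [List.cons_append, pvDictAdd, if_neg hne]
    rw [ih h.2]

theorem pvPassA_cons (s free pend : Int) (pm lm : List (String × Int))
    (p : String × Int) (tl : List (String × Int)) :
    pvPassA s (p :: tl) (free, pend, pm, lm) =
      pvPassA s tl (free - min (min p.2 s) free, pend - min (min p.2 s) free,
        pvDictAdd pm p.1 (-(min (min p.2 s) free)), pvDictAdd lm p.1 (min (min p.2 s) free)) := rfl

theorem pvPassA_eq : ∀ (l l2 d1 d2 : List (String × Int)) (s free pend : Int),
    (l.map Prod.fst).Nodup →
    (∀ k ∈ l.map Prod.fst, k ∉ d1.map Prod.fst) →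
    (∀ k ∈ l.map Prod.fst, k ∉ d2.map Prod.fst) →
    l2.map Prod.fst = l.map Prod.fst →
    pvPassA s l (free, pend, d1 ++ l, d2 ++ l2) =
      (free - (pvChunks s free (l.map Prod.snd)).sum,
       pend - (pvChunks s free (l.map Prod.snd)).sum,
       d1 ++ (l.map Prod.fst).zip ((l.map Prod.snd).zipWith (· - ·) (pvChunks s free (l.map Prod.snd))),
       d2 ++ (l.map Prod.fst).zip ((l2.map Prod.snd).zipWith (· + ·) (pvChunks s free (l.map Prod.snd)))) := by
  intro l
  induction l with
  | nil =>
    intro l2 d1 d2 s free pend _ _ _ hl2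
    have : l2 = [] := by
      cases l2 with
      | nil => rfl
      | cons q t => simp at hl2
    subst this
    simp [pvPassA, pvChunks]
  | cons p tl ih =>
    intro l2 d1 d2 s free pend hnd hd1 hd2 hl2
    cases l2 with
    | nil => simp at hl2
    | cons q tl2 =>
      simp only [List.map_cons, List.cons.injEq] at hl2
      obtain ⟨hq1, htl2⟩ := hl2
      have hp_d1 : p.1 ∉ d1.map Prod.fst := hd1 p.1 (by simp)
      have hp_d2 : p.1 ∉ d2.map Prod.fst := hd2 p.1 (by simp)
      have hnd' : (tl.map Prod.fst).Nodup := (List.nodup_cons.mp (by simpa using hnd)).2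
      have hp_tl : p.1 ∉ tl.map Prod.fst := (List.nodup_cons.mp (by simpa using hnd)).1
      have e1 : pvDictAdd (d1 ++ p :: tl) p.1 (-(min (min p.2 s) free)) =
          (d1 ++ [(p.1, p.2 - min (min p.2 s) free)]) ++ tl := by
        rw [pvDictAdd_notmem d1 p.1 _ hp_d1]
        have h : pvDictAdd (p :: tl) p.1 (-(min (min p.2 s) free)) =
            (p.1, p.2 + -(min (min p.2 s) free)) :: tl := by simp [pvDictAdd]
        rw [h, ← sub_eq_add_neg]
        simp
      have e2 : pvDictAdd (d2 ++ q :: tl2) p.1 (min (min p.2 s) free) =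
          (d2 ++ [(q.1, q.2 + min (min p.2 s) free)]) ++ tl2 := by
        rw [pvDictAdd_notmem d2 p.1 _ hp_d2]
        have h : pvDictAdd (q :: tl2) p.1 (min (min p.2 s) free) =
            (q.1, q.2 + min (min p.2 s) free) :: tl2 := by simp [pvDictAdd, hq1]
        rw [h]
        simp
      have hrec := ih tl2 (d1 ++ [(p.1, p.2 - min (min p.2 s) free)])
        (d2 ++ [(q.1, q.2 + min (min p.2 s) free)]) s
        (free - min (min p.2 s) free) (pend - min (min p.2 s) free)
        hnd'
        (by
          intro k hk
          simp only [List.map_append, List.mem_append, List.map_cons, List.map_nil,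
            List.mem_singleton]
          push_neg
          exact ⟨fun hc => hd1 k (by simp [hk]) hc, fun he => hp_tl (he ▸ hk)⟩)
        (by
          intro k hk
          simp only [List.map_append, List.mem_append, List.map_cons, List.map_nil,
            List.mem_singleton]
          push_neg
          refine ⟨fun hc => hd2 k (by simp [hk]) hc, ?_⟩
          rw [hq1]
          exact fun he => hp_tl (he ▸ hk))
        htl2
      rw [pvPassA_cons, e1, e2, hrec]
      have hchunks : pvChunks s free ((p :: tl).map Prod.snd) =
          min (min p.2 s) free ::
            pvChunks s (free - min (min p.2 s) free) (tl.map Prod.snd) := rfl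
      rw [hchunks]
      simp only [List.map_cons, List.sum_cons, List.zipWith_cons_cons, List.zip_cons_cons,
        Prod.mk.injEq]
      refine ⟨by ring, by ring, ?_, ?_⟩
      · simp [List.append_assoc]
      · rw [hq1]
        simp [List.append_assoc]

theorem pvZipMapSnd {β : Type} (g : Int → β) : ∀ (ks : List String) (v : List Int),
    v.length = ks.length → ((ks.zip v).map (fun p => g p.2)) = v.map g := by
  intro ks
  induction ks with
  | nil => intro v hv; cases v with | nil => rfl | cons _ _ => simp at hv
  | cons k ktl ih =>
    intro v hv
    cases v with
    | nil => simp at hv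
    | cons x vtl =>
      simp only [List.zip_cons_cons, List.map_cons]
      rw [ih vtl (by simpa using hv)]

theorem pvLoopA_nonpos (fuel : Nat) (free pend : Int) (pm lm : List (String × Int))
    (h : ¬ (free > 0 ∧ pend > 0)) : pvLoopA fuel free pend pm lm = lm := by
  cases fuel with
  | zero => rfl
  | succ n => rw [pvLoopA, if_neg h]

theorem pvLoopA_eq : ∀ (fuel : Nat) (free pend : Int) (ks : List String) (v lv : List Int),
    ks.Nodup → v.length = ks.length → lv.length = ks.length →
    pvLoopA fuel free pend (ks.zip v) (ks.zip lv) = ks.zip (pvLoopV fuel free pend v lv) := by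
  intro fuel
  induction fuel with
  | zero => intro free pend ks v lv _ _ _; rfl
  | succ fuel ih =>
    intro free pend ks v lv hnd hv hlv
    rw [pvLoopA, pvLoopV]
    by_cases hg : free > 0 ∧ pend > 0
    case neg => rw [if_neg hg, if_neg hg]
    case pos =>
      rw [if_pos hg, if_pos hg]
      simp only []
      have hnum : ((ks.zip v).map (fun p => if p.2 ≠ 0 then (1:Int) else 0)).sum =
          (v.map (fun d => if d ≠ 0 then (1:Int) else 0)).sum := by
        rw [pvZipMapSnd (fun d => if d ≠ 0 then (1:Int) else 0) ks v hv]
      rw [hnum]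
      set s := if PySem.Int.truncdiv free (v.map (fun d => if d ≠ 0 then (1:Int) else 0)).sum = 0
        then (1:Int)
        else PySem.Int.truncdiv free (v.map (fun d => if d ≠ 0 then (1:Int) else 0)).sum with hsdef
      have hmf : (ks.zip v).map Prod.fst = ks := List.map_fst_zip (by omega)
      have hms : (ks.zip v).map Prod.snd = v := List.map_snd_zip (by omega)
      have hms2 : (ks.zip lv).map Prod.snd = lv := List.map_snd_zip (by omega)
      have hml2 : (ks.zip lv).map Prod.fst = (ks.zip v).map Prod.fst := by
        rw [hmf, List.map_fst_zip (by omega : ks.length ≤ lv.length)]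
      have hpass := pvPassA_eq (ks.zip v) (ks.zip lv) [] [] s free pend
        (by rw [hmf]; exact hnd) (by simp) (by simp) hml2
      simp only [List.nil_append] at hpass
      rw [hpass]
      simp only [hmf, hms, hms2]
      have hclen : (pvChunks s free v).length = v.length := pvChunks_length s free v
      exact ih (free - (pvChunks s free v).sum) (pend - (pvChunks s free v).sum) ks
        (v.zipWith (· - ·) (pvChunks s free v)) (lv.zipWith (· + ·) (pvChunks s free v))
        hnd (by simp [hclen]; omega) (by simp [hclen]; omega)

-- ---- B reduces to the value level ----

theorem pvAssignB_eq : ∀ (l : List (String × Int)) (L r : Int),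
    pvAssignB l L r = (l.map Prod.fst).zip (pvAssignV (l.map Prod.snd) L r) := by
  intro l
  induction l with
  | nil => intro L r; rfl
  | cons p tl ih =>
    intro L r
    simp only [List.map_cons]
    rw [pvAssignB, pvAssignV]
    by_cases hc : p.2 > L ∧ r > 0
    · rw [if_pos hc, if_pos hc, List.zip_cons_cons, ih]
    · rw [if_neg hc, if_neg hc, List.zip_cons_cons, ih]

theorem pvZipFstSnd {α β : Type} : ∀ (l : List (α × β)), (l.map Prod.fst).zip (l.map Prod.snd) = l := by
  intro l
  induction l with
  | nil => rfl
  | cons p tl ih => simp only [List.map_cons, List.zip_cons_cons, ih]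

theorem pvMapPairZero : ∀ (l : List (String × Int)),
    l.map (fun p => (p.1, (0:Int))) = (l.map Prod.fst).zip ((l.map Prod.snd).map (fun _ => (0:Int))) := by
  intro l
  induction l with
  | nil => rfl
  | cons p tl ih => simp only [List.map_cons, List.zip_cons_cons, ih]

theorem pvAlt_spec (free : Int) (pjm : List (String × Int))
    (hv : ∀ p ∈ pjm, 0 ≤ p.2) :
    ∃ a, pvAlloc free (pjm.map Prod.snd) a ∧
      get_job_limit_map_alt free pjm = (pjm.map Prod.fst).zip a := by
  have hvv : ∀ d ∈ pjm.map Prod.snd, 0 ≤ d := by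
    intro d hd
    rcases List.mem_map.mp hd with ⟨p, hp, rfl⟩
    exact hv p hp
  unfold get_job_limit_map_alt
  simp only []
  by_cases h1 : free ≤ 0 ∨ (pjm.map (·.2)).sum ≤ 0
  · rw [if_pos h1]
    refine ⟨(pjm.map Prod.snd).map (fun _ => 0), ?_, ?_⟩
    · by_cases hf : free ≤ 0
      · exact Or.inl ⟨hf, rfl⟩
      · push_neg at hf
        have hsum : (pjm.map Prod.snd).sum ≤ 0 := by
          rcases h1 with h | h
          · omega
          · exact h
        exact Or.inr (Or.inl ⟨hf, by omega, pvSum_nonpos_eq_zeros _ hvv hsum⟩)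
    · rw [pvMapPairZero]
  · rw [if_neg h1]
    push_neg at h1
    obtain ⟨hf, ht⟩ := h1
    by_cases h2 : free ≥ (pjm.map (·.2)).sum
    · rw [if_pos h2]
      exact ⟨pjm.map Prod.snd, Or.inr (Or.inl ⟨by omega, h2, rfl⟩), (pvZipFstSnd pjm).symm⟩
    · rw [if_neg h2]
      push_neg at h2
      set ds := PySem.List.sorted (pjm.map (·.2)) (fun x => x) false with hdsdef
      have hperm : ds.Perm (pjm.map (·.2)) := PySem.List.sorted_perm _ _ _
      have hpw : ds.Pairwise (· ≤ ·) := PySem.List.sorted_pairwise (pjm.map (·.2)) (fun x => x)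
      have hdsv : ∀ x ∈ ds, 0 ≤ x := fun x hx => hvv x (hperm.mem_iff.mp hx)
      have hdss : (pjm.map (·.2)).sum = ds.sum := hperm.sum_eq.symm
      have hlr := pvScanB_spec ds free hpw hdsv (by omega) (by rw [← hdss]; omega)
      have hlrv : pvLR free (pjm.map Prod.snd) (pvScanB ds 0 free).1 (pvScanB ds 0 free).2 :=
        pvLR_perm hperm hlr
      refine ⟨pvAssignV (pjm.map Prod.snd) (pvScanB ds 0 free).1 (pvScanB ds 0 free).2, ?_, ?_⟩
      · exact Or.inr (Or.inr ⟨by omega, by omega, _, _, hlrv, rfl⟩)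
      · rw [pvAssignB_eq]

-- ---- uniqueness of the declarative allocation ----

theorem pvAlloc_unique {F : Int} {v a a' : List Int} (hv : ∀ d ∈ v, 0 ≤ d)
    (h : pvAlloc F v a) (h' : pvAlloc F v a') : a = a' := by
  rcases h with ⟨hf, ha⟩ | ⟨hf, hs, ha⟩ | ⟨hf, hs, L, r, hlr, ha⟩ <;>
    rcases h' with ⟨hf', ha'⟩ | ⟨hf', hs', ha'⟩ | ⟨hf', hs', L', r', hlr', ha'⟩
  · rw [ha, ha']
  · omega
  · omega
  · omega
  · rw [ha, ha']
  · omega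
  · omega
  · omega
  · obtain ⟨hL, hr⟩ := pvLR_unique hlr hlr'
    rw [ha, ha', hL, hr]

theorem pvAlloc_length {F : Int} {v a : List Int} (h : pvAlloc F v a) : a.length = v.length := by
  rcases h with ⟨_, ha⟩ | ⟨_, _, ha⟩ | ⟨_, _, L, r, _, ha⟩
  · rw [ha]; simp
  · rw [ha]
  · rw [ha]; exact pvAssignV_length v L r

-- ===== VERDICT (by name: the statement is the Claim_ definition above) =====
theorem get_job_limit_map_spec : Claim_equal_get_job_limit_map := by
  unfold Claim_equal_get_job_limit_map
  intro free pjm _ hpre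
  obtain ⟨hnd, hdisj⟩ := hpre
  unfold Spec_get_job_limit_map
  by_cases hf : free ≤ 0
  case pos =>
    unfold get_job_limit_map get_job_limit_map_alt
    rw [pvLoopA_nonpos _ _ _ _ _ (by omega), if_pos (Or.inl hf)]
  case neg =>
  have hv : ∀ p ∈ pjm, 0 ≤ p.2 := by
    rcases hdisj with h | h
    · omega
    · exact h
  have hvv : ∀ d ∈ pjm.map Prod.snd, 0 ≤ d := by
    intro d hd
    rcases List.mem_map.mp hd with ⟨p, hp, rfl⟩
    exact hv p hp
  have hloop := pvLoopA_eq
    (free.toNat + ((pjm.map (fun p => p.2.natAbs)).sum) + pjm.length + 2)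
    free ((pjm.map Prod.snd).sum) (pjm.map Prod.fst) (pjm.map Prod.snd)
    ((pjm.map Prod.snd).map (fun _ => 0)) hnd (by simp) (by simp)
  rw [pvZipFstSnd pjm] at hloop
  rw [← pvMapPairZero pjm] at hloop
  have hgoal : get_job_limit_map free pjm =
      (pjm.map Prod.fst).zip
        (pvLoopV (free.toNat + ((pjm.map (fun p => p.2.natAbs)).sum) + pjm.length + 2)
          free (pjm.map Prod.snd).sum (pjm.map Prod.snd)
          ((pjm.map Prod.snd).map (fun _ => 0))) := by
    unfold get_job_limit_map
    exact hloop
  obtain ⟨a, ha, heq⟩ := pvLoopV_spec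
    (free.toNat + ((pjm.map (fun p => p.2.natAbs)).sum) + pjm.length + 2)
    free (pjm.map Prod.snd) ((pjm.map Prod.snd).map (fun _ => 0)) hvv (by omega) (by simp)
  obtain ⟨a', ha', heq'⟩ := pvAlt_spec free pjm hv
  have haa : a = a' := pvAlloc_unique hvv ha ha'
  rw [hgoal, heq, pvZeros_zip_add (pjm.map Prod.snd) a (pvAlloc_length ha).symm, haa, heq']
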